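-- pv_equiv track=rewrite | github.com/colin-thornburg/dbt-demo-automation | src/naming.py | identify_foreign_keys
-- ===== SOURCE A (Python) =====
-- from typing import Dict, List, Optional
--
-- def identify_foreign_keys(
--     columns: List[str],
--     pk_column: str,
--     all_table_names: List[str],
-- ) -> Dict[str, str]:
--     """
--     Identify foreign key columns and their referenced table names.
--
--     Returns ``{column_name: referenced_table_full_name}``.
--     """
--     fk_map: Dict[str, str] = {}
--     table_bases: Dict[str, str] = {}
--     for tn in all_table_names:
--         base = tn.split('.')[-1].lower()
--         for prefix in ('raw_', 'src_', 'source_', 'stg_'):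
--             if base.startswith(prefix):
--                 base = base[len(prefix):]
--         table_bases[base] = tn
--         singular = base.rstrip('s') if base.endswith('s') and len(base) > 2 else base
--         if singular != base:
--             table_bases[singular] = tn
--
--     for col in columns:
--         if col == pk_column:
--             continue
--         col_lower = col.lower()
--         if not col_lower.endswith('_id'):
--             continue
--         entity = col_lower[:-3]
--         if entity in table_bases:
--             fk_map[col] = table_bases[entity]
--
--     return fk_map
-- ===== SOURCE B (Python) =====
-- from typing import Dict, List
--
--
-- def identify_foreign_keys(
--     columns: List[str],
--     pk_column: str,
--     all_table_names: List[str],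
-- ) -> Dict[str, str]:
--     """Identify foreign key columns and their referenced table names.
--
--     No precomputed base->table dict: each FK column is resolved by scanning
--     the table names in reverse and taking the first (boolean) match, which
--     equals the dict's last-write-wins lookup.
--     """
--
--     def strip(name: str, prefixes):
--         if not prefixes:
--             return name
--         head = prefixes[0]
--         return strip(name[len(head):] if name.startswith(head) else name,
--                      prefixes[1:])
--
--     def matches(tn: str, entity: str) -> bool:
--         base = strip(tn.rsplit('.', 1)[-1].lower(),
--                      ['raw_', 'src_', 'source_', 'stg_'])
--         if base == entity:
--             return True
--         return base.endswith('s') and len(base) > 2 and base.rstrip('s') == entity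
--
--     fk_map: Dict[str, str] = {}
--     for col in columns:
--         if col == pk_column:
--             continue
--         low = col.lower()
--         if low.endswith('_id'):
--             for tn in reversed(all_table_names):
--                 if matches(tn, low[:-3]):
--                     fk_map[col] = tn
--                     break
--     return fk_map
-- ===== Notes on version B (the rewrite author's own statement) =====
-- stated objective: alternative
-- what changed: Drops A's precomputed base/singular->table dict entirely: each FK column is resolved by scanning all_table_names in reverse with a boolean matcher (recursive prefix stripping) and stopping at the first match, which reproduces the dict's last-write-wins lookup.
import Mathlib
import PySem

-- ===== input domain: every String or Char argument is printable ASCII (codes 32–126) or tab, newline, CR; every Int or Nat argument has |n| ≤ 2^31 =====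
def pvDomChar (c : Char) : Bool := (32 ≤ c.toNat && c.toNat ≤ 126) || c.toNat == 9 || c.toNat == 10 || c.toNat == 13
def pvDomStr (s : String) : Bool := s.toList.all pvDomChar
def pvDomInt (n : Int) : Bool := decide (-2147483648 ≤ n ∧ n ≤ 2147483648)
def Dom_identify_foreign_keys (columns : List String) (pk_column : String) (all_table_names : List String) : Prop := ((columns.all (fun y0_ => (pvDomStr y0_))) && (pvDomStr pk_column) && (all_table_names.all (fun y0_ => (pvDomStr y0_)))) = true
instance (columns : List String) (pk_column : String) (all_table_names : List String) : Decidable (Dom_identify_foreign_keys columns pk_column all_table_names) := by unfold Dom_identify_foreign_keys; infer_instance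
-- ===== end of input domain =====

-- B drops A's precomputed base->table dict: each FK column is resolved by a reverse scan over the table names taking the first boolean match; equivalence proved on all inputs (A is total).


-- ===== PORT A =====
-- exact port of str.rstrip('s') (drop all trailing 's'; PySem has no rstrip-with-chars)
def pvRstripS (s : String) : String := String.ofList ((s.toList.reverse.dropWhile (· == 's')).reverse)

-- A's local base before prefix stripping: tn.split('.')[-1].lower()
-- (split('.') is never empty, so [-1] never raises; the getD "" branch is dead)
def pvTblBase0 (tn : String) : String :=
  PySem.Str.lower ((PySem.List.pyGet? ((PySem.Str.split? tn ".").getD []) (-1)).getD "")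

-- A's base after the sequential prefix loop
def pvTblBaseStr (tn : String) : String :=
  ["raw_", "src_", "source_", "stg_"].foldl
    (fun b p => if PySem.Str.startswith b p then PySem.Str.slice b (some (PySem.Str.len p)) none else b)
    (pvTblBase0 tn)

-- A's singular = base.rstrip('s') if base.endswith('s') and len(base) > 2 else base
def pvTblSingular (tn : String) : String :=
  if PySem.Str.endswith (pvTblBaseStr tn) "s" && decide (2 < PySem.Str.len (pvTblBaseStr tn))
  then pvRstripS (pvTblBaseStr tn) else pvTblBaseStr tn

-- body of A's first loop: table_bases[base] = tn; if singular != base: table_bases[singular] = tn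
def pvTblStep (d : PySem.Dict String String) (tn : String) : PySem.Dict String String :=
  if pvTblSingular tn ≠ pvTblBaseStr tn
  then (d.insert (pvTblBaseStr tn) tn).insert (pvTblSingular tn) tn
  else d.insert (pvTblBaseStr tn) tn

-- body of A's second loop, over columns
def pvColStepA (table_bases : PySem.Dict String String) (pk_column : String)
    (fk : PySem.Dict String String) (col : String) : PySem.Dict String String :=
  if col = pk_column then fk
  else if ¬ (PySem.Str.endswith (PySem.Str.lower col) "_id" = true) then fk
  else match table_bases.get? (PySem.Str.slice (PySem.Str.lower col) none (some (-3))) with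
       | some tn => fk.insert col tn
       | none => fk

def identify_foreign_keys (columns : List String) (pk_column : String) (all_table_names : List String) : List (String × String) :=
  let table_bases := all_table_names.foldl pvTblStep PySem.Dict.empty
  (columns.foldl (pvColStepA table_bases pk_column) PySem.Dict.empty).items

-- ===== PORT B =====
-- B's recursive helper strip(name, prefixes)
def pvStripPrefixes : String → List String → String
  | b, [] => b
  | b, p :: ps =>
      pvStripPrefixes (if PySem.Str.startswith b p then PySem.Str.slice b (some (PySem.Str.len p)) none else b) ps

-- B's local variable base of matches(tn, entity): the last piece of tn.rsplit('.', 1) is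
-- the last piece of the full split, ported as getLastD
def pvTableKey (tn : String) : String :=
  pvStripPrefixes (PySem.Str.lower (((PySem.Str.split? tn ".").getD []).getLastD ""))
    ["raw_", "src_", "source_", "stg_"]

-- B's boolean matcher matches(tn, entity); rstrip('s') ported as List.rdropWhile (exact)
def pvMatches (tn entity : String) : Bool :=
  if pvTableKey tn = entity then true
  else PySem.Str.endswith (pvTableKey tn) "s" && decide (2 < PySem.Str.len (pvTableKey tn))
         && (String.ofList ((pvTableKey tn).toList.rdropWhile (· == 's')) == entity)

def identify_foreign_keys_alt (columns : List String) (pk_column : String) (all_table_names : List String) : List (String × String) :=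
  (columns.foldl
    (fun fk col =>
      if col = pk_column then fk
      else
        let low := PySem.Str.lower col
        if PySem.Str.endswith low "_id" = true then
          match all_table_names.reverse.find? (fun tn => pvMatches tn (PySem.Str.slice low none (some (-3)))) with
          | some tn => fk.insert col tn
          | none => fk
        else fk)
    PySem.Dict.empty).items

-- ===== PRECONDITION & SPEC =====
def Spec_identify_foreign_keys (columns : List String) (pk_column : String) (all_table_names : List String) (out : List (String × String)) : Prop := out = identify_foreign_keys_alt columns pk_column all_table_names
instance (columns : List String) (pk_column : String) (all_table_names : List String) (out : List (String × String)) : Decidable (Spec_identify_foreign_keys columns pk_column all_table_names out) := by unfold Spec_identify_foreign_keys; infer_instance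

-- ===== CLAIM (what is proved, stated in full; the proofs are below) =====
def Claim_equal_identify_foreign_keys : Prop := ∀ (columns : List String) (pk_column : String) (all_table_names : List String), Dom_identify_foreign_keys columns pk_column all_table_names → Spec_identify_foreign_keys columns pk_column all_table_names (identify_foreign_keys columns pk_column all_table_names)

-- ===== LEMMAS AND PROOFS =====

-- B's base variable is A's stripped base
theorem pvTableKey_eq (tn : String) : pvTableKey tn = pvTblBaseStr tn := by
  have hlast : ∀ l : List String, (PySem.List.pyGet? l (-1)).getD "" = l.getLastD "" := by
    intro l
    rw [PySem.List.pyGet?_neg_one]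
    cases l using List.reverseRecOn <;> simp
  have hstrip : ∀ (ps : List String) (b : String),
      pvStripPrefixes b ps
        = ps.foldl (fun b p => if PySem.Str.startswith b p then PySem.Str.slice b (some (PySem.Str.len p)) none else b) b := by
    intro ps
    induction ps with
    | nil => intro b; rfl
    | cons p ps ih => intro b; simp only [pvStripPrefixes, ih, List.foldl_cons]
  unfold pvTableKey pvTblBaseStr pvTblBase0
  rw [hstrip, hlast]

-- B's matcher decides exactly A's "base or singular equals entity"
theorem pv_matches_iff (tn k : String) :
    pvMatches tn k = true ↔ (pvTblBaseStr tn = k ∨ pvTblSingular tn = k) := by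
  have hr : ∀ s : String, String.ofList (s.toList.rdropWhile (· == 's')) = pvRstripS s := by
    intro s; rfl
  rw [pvMatches, pvTableKey_eq, pvTblSingular, hr]
  generalize pvTblBaseStr tn = b
  by_cases hb : b = k
  · simp [hb]
  · rw [if_neg hb]
    by_cases h1 : PySem.Str.endswith b "s" = true
    · by_cases h2 : 2 < PySem.Str.len b
      · simp only [h1, h2, decide_true, Bool.true_and, Bool.and_true, if_true, beq_iff_eq]
        simp [hb]
      · simp only [h1, decide_eq_true_eq, h2, decide_false, Bool.true_and, Bool.false_and,
          Bool.and_false, if_false]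
        simp [hb]
    · simp only [Bool.and_eq_true] at *
      simp [show ¬PySem.Chars.endswith b.toList ['s'] = true from h1, hb]

-- one table loop step of A, seen through get?: last-write-wins at key k
theorem pv_get?_tblStep (d : PySem.Dict String String) (t k : String) :
    (pvTblStep d t).get? k
      = if pvTblBaseStr t = k ∨ pvTblSingular t = k then some t else d.get? k := by
  unfold pvTblStep
  by_cases hs : pvTblSingular t = pvTblBaseStr t
  · rw [if_neg (by simp [hs]), PySem.Dict.get?_insert]
    by_cases hk : k = pvTblBaseStr t
    · simp [hk, hs]
    · rw [if_neg hk, if_neg (by rw [hs, or_self]; exact fun h => hk h.symm)]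
  · rw [if_pos hs, PySem.Dict.get?_insert, PySem.Dict.get?_insert]
    by_cases h2 : k = pvTblSingular t
    · simp [h2]
    · rw [if_neg h2]
      by_cases h1 : k = pvTblBaseStr t
      · simp [h1]
      · rw [if_neg h1, if_neg (by rintro (h | h); exacts [h1 h.symm, h2 h.symm])]

-- a last-match fold equals first match on the reversed list (accumulator generalized)
theorem pv_foldl_last_eq_reverse_find? {α : Type} (p : α → Bool) (ts : List α) (a : Option α) :
    ts.foldl (fun m tn => if p tn then some tn else m) a = (ts.reverse.find? p).or a := by
  induction ts generalizing a with
  | nil => simp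
  | cons t ts ih =>
    simp only [List.foldl_cons, List.reverse_cons, List.find?_append, ih]
    cases h : ts.reverse.find? p <;> by_cases hp : p t <;> simp [hp, Option.or]

-- A's table_bases lookup at key k equals B's reverse first-match scan
theorem pv_get?_build (ts : List String) (k : String) :
    (ts.foldl pvTblStep PySem.Dict.empty).get? k
      = ts.reverse.find? (fun tn => pvMatches tn k) := by
  have step : ∀ (d : PySem.Dict String String),
      (ts.foldl pvTblStep d).get? k
        = ts.foldl (fun m tn => if pvMatches tn k then some tn else m) (d.get? k) := by
    induction ts with
    | nil => intro d; rfl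
    | cons t ts ih =>
      intro d
      simp only [List.foldl_cons]
      rw [ih, pv_get?_tblStep]
      have hacc : (if pvTblBaseStr t = k ∨ pvTblSingular t = k then some t else d.get? k)
          = (if pvMatches t k = true then some t else d.get? k) := by
        by_cases h : pvMatches t k = true
        · rw [if_pos ((pv_matches_iff t k).mp h), if_pos h]
        · rw [if_neg (fun hc => h ((pv_matches_iff t k).mpr hc)), if_neg h]
      rw [hacc]
  rw [step, pv_foldl_last_eq_reverse_find?, PySem.Dict.get?_empty]
  cases ts.reverse.find? (fun tn => pvMatches tn k) <;> rfl

theorem pv_colStep_eq (all_table_names : List String) (pk_column : String) :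
    pvColStepA (all_table_names.foldl pvTblStep PySem.Dict.empty) pk_column
      = (fun fk col =>
          if col = pk_column then fk
          else if PySem.Str.endswith (PySem.Str.lower col) "_id" = true then
            match all_table_names.reverse.find? (fun tn => pvMatches tn (PySem.Str.slice (PySem.Str.lower col) none (some (-3)))) with
            | some tn => fk.insert col tn
            | none => fk
          else fk) := by
  funext fk col
  unfold pvColStepA
  by_cases hpk : col = pk_column
  · simp [hpk]
  · by_cases hid : PySem.Str.endswith (PySem.Str.lower col) "_id" = true
    · rw [if_neg hpk, if_neg (not_not_intro hid), if_neg hpk, if_pos hid, pv_get?_build]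
    · rw [if_neg hpk, if_pos hid, if_neg hpk, if_neg hid]

theorem identify_foreign_keys_eq (columns : List String) (pk_column : String) (all_table_names : List String) :
    identify_foreign_keys columns pk_column all_table_names
      = identify_foreign_keys_alt columns pk_column all_table_names := by
  simp only [identify_foreign_keys, identify_foreign_keys_alt]
  rw [pv_colStep_eq]

-- ===== VERDICT (by name: the statement is the Claim_ definition above) =====
theorem identify_foreign_keys_spec : Claim_equal_identify_foreign_keys := by
  intro columns pk_column all_table_names _
  exact identify_foreign_keys_eq columns pk_column all_table_names
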